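-- pv_equiv track=rewrite | github.com/glkwhr/NYC-Crime-Analysis | data_cleaning_analysis/checkNullandTypeError.py | checkNotNumber
-- ===== SOURCE A (Python) =====
-- def checkNotNumber(line, index):
-- 	result = False
-- 	if len(line[index]) == 0:
-- 		result = False
-- 	else:
-- 		s = line[index]
-- 		for character in s:
-- 			if (not character.isdigit()) and character != '.':
-- 				result = True
-- 	return result
-- ===== SOURCE B (Python) =====
-- def checkNotNumber(line, index):
--     return line[index].strip('0123456789.') != ''
-- ===== Notes on version B (the rewrite author's own statement) =====
-- stated objective: simpler
-- what changed: Replaces the per-character flag-setting loop with str.strip of the allowed characters from both ends: a forbidden character blocks the trim, so the field is non-numeric iff the stripped remainder is nonempty.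
import Mathlib
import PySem

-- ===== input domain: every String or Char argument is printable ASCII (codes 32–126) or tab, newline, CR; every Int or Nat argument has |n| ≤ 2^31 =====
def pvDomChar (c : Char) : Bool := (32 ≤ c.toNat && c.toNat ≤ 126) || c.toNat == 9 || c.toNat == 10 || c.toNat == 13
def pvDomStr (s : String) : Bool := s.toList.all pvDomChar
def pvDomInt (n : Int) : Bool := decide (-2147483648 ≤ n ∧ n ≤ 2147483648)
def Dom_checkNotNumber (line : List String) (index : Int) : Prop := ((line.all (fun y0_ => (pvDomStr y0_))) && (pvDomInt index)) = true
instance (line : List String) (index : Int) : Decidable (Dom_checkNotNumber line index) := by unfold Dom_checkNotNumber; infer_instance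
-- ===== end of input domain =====

-- B replaces A's per-character flag-setting loop with strip('0123456789.') from both ends: the field is non-numeric iff the stripped remainder is nonempty (simpler; same cost).


-- ===== PORT A =====
def checkNotNumber (line : List String) (index : Int) : Bool :=
  let result := false
  if PySem.Chars.len (PySem.List.pyGetD line index "").toList == 0 then
    false
  else
    let s := (PySem.List.pyGetD line index "").toList
    s.foldl (fun result character =>
      if !(PySem.Chars.isdigit character) && character != '.' then true else result) result

-- ===== PORT B =====
def checkNotNumber_alt (line : List String) (index : Int) : Bool :=
  PySem.Chars.stripChars (PySem.List.pyGetD line index "").toList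
      ['0','1','2','3','4','5','6','7','8','9','.'] != []

-- ===== PRECONDITION & SPEC =====
-- Pre_ excludes exactly the indices on which line[index] raises IndexError in Python.
def Pre_checkNotNumber (line : List String) (index : Int) : Prop :=
  PySem.Raise.InRange line.length index
instance (line : List String) (index : Int) : Decidable (Pre_checkNotNumber line index) := by unfold Pre_checkNotNumber; infer_instance
def pvWitness_checkNotNumber : List String × Int := (["12.5", "a1"], 0)

def Spec_checkNotNumber (line : List String) (index : Int) (out : Bool) : Prop := out = checkNotNumber_alt line index
instance (line : List String) (index : Int) (out : Bool) : Decidable (Spec_checkNotNumber line index out) := by unfold Spec_checkNotNumber; infer_instance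

-- ===== CLAIM (what is proved, stated in full; the proofs are below) =====
def Claim_equal_checkNotNumber : Prop := ∀ (line : List String) (index : Int), Dom_checkNotNumber line index → Pre_checkNotNumber line index → Spec_checkNotNumber line index (checkNotNumber line index)

-- ===== LEMMAS AND PROOFS =====

theorem pv_mem_allowed (c : Char) :
    ((['0','1','2','3','4','5','6','7','8','9','.'] : List Char).contains c = true)
      ↔ (('0' ≤ c ∧ c ≤ '9') ∨ c = '.') := by
  simp only [List.contains_eq_mem, decide_eq_true_eq, List.mem_cons, List.not_mem_nil, or_false,
    Char.le_def, Char.ext_iff, UInt32.ext_iff, UInt32.le_iff_toNat_le]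
  have h0 : ('0':Char).val.toNat = 48 := rfl
  have h1 : ('1':Char).val.toNat = 49 := rfl
  have h2 : ('2':Char).val.toNat = 50 := rfl
  have h3 : ('3':Char).val.toNat = 51 := rfl
  have h4 : ('4':Char).val.toNat = 52 := rfl
  have h5 : ('5':Char).val.toNat = 53 := rfl
  have h6 : ('6':Char).val.toNat = 54 := rfl
  have h7 : ('7':Char).val.toNat = 55 := rfl
  have h8 : ('8':Char).val.toNat = 56 := rfl
  have h9 : ('9':Char).val.toNat = 57 := rfl
  have hd : ('.':Char).val.toNat = 46 := rfl
  omega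

-- A's loop computes "some character is bad", with the flag threaded through the fold.
theorem pv_foldl_flag (cs : List Char) (b : Bool) :
    cs.foldl (fun result character =>
      if !(PySem.Chars.isdigit character) && character != '.' then true else result) b
    = (b || cs.any (fun c => !(PySem.Chars.isdigit c) && c != '.')) := by
  induction cs generalizing b with
  | nil => simp
  | cons c cs ih =>
    simp only [List.foldl_cons, List.any_cons, ih]
    by_cases h : (!(PySem.Chars.isdigit c) && c != '.') = true <;> simp [h]

-- stripChars leaves the empty string iff every character is in the strip set.
theorem pv_stripChars_eq_nil_iff (cs allowed : List Char) :
    (PySem.Chars.stripChars cs allowed = []) ↔ (∀ c ∈ cs, allowed.contains c = true) := by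
  unfold PySem.Chars.stripChars
  simp only [List.reverse_eq_nil_iff, List.dropWhile_eq_nil_iff, List.mem_reverse]
  constructor
  · intro h c hc
    rcases List.mem_append.mp
        ((List.takeWhile_append_dropWhile (p := fun c => allowed.contains c) (l := cs)) ▸ hc) with
      ht | hd
    · exact List.mem_takeWhile_imp ht
    · exact h c hd
  · intro h c hc
    exact h c (List.dropWhile_sublist _ |>.subset hc)

-- ===== VERDICT (by name: the statement is the Claim_ definition above) =====
theorem checkNotNumber_spec : Claim_equal_checkNotNumber := by
  intro line index _ _
  unfold Spec_checkNotNumber checkNotNumber checkNotNumber_alt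
  simp only [pv_foldl_flag, Bool.false_or]
  cases hcs : (PySem.List.pyGetD line index "").toList with
  | nil => simp [PySem.Chars.len, PySem.Chars.stripChars]
  | cons c cs =>
    rw [if_neg (by simp [PySem.Chars.len]; omega)]
    cases h : (c :: cs).any (fun c => !(PySem.Chars.isdigit c) && c != '.') with
    | false =>
      simp only [List.any_eq_false] at h
      symm
      rw [bne_eq_false_iff_eq]
      exact (pv_stripChars_eq_nil_iff _ _).mpr (by
        intro x hx
        have := h x hx
        rw [pv_mem_allowed]
        simp only [Bool.and_eq_true, Bool.not_eq_true', bne_iff_ne, not_and_or,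
          Bool.not_eq_false, not_not, ne_eq] at this
        rcases this with hd | hdot
        · left; simpa [PySem.Chars.isdigit] using hd
        · right; exact hdot)
    | true =>
      simp only [List.any_eq_true] at h
      obtain ⟨x, hx, hbad⟩ := h
      symm
      rw [bne_iff_ne]
      intro hnil
      have := (pv_stripChars_eq_nil_iff _ _).mp hnil x hx
      rw [pv_mem_allowed] at this
      simp only [Bool.and_eq_true, Bool.not_eq_true', bne_iff_ne] at hbad
      rcases this with hdig | hdot
      · have hdg : PySem.Chars.isdigit x = true := by
          simp [PySem.Chars.isdigit, hdig.1, hdig.2]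
        simp [hdg] at hbad
      · exact hbad.2 hdot
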